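-- pv_equiv track=rewrite | github.com/NbAiLab/notram | corpus_generation_scripts/utils/jsonrepair.py | countsingequotes
-- ===== SOURCE A (Python) =====
-- def countsingequotes(mystr):
--     hypcount=0
--     prevchar='a'
--     for c in mystr:
--         if c == "'" and prevchar !="\\":
--             hypcount += 1
--         prevchar=c
--
--     return hypcount
-- ===== SOURCE B (Python) =====
-- def countsingequotes(mystr):
--     # Every quote counted by A is a quote in the string, except quotes whose
--     # previous character is a backslash -- exactly the (non-overlapping, since
--     # "\\'" occurrences can never overlap) occurrences of the two-char substring "\'".
--     return mystr.count("'") - mystr.count("\\'")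
-- ===== Notes on version B (the rewrite author's own statement) =====
-- stated objective: simpler
-- what changed: Replaces the explicit character loop with prevchar state by a closed-form difference of two substring counts: str.count("'") minus str.count("\\'") (escaped-quote occurrences can never overlap, so non-overlapping counting is exact).
import Mathlib
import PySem

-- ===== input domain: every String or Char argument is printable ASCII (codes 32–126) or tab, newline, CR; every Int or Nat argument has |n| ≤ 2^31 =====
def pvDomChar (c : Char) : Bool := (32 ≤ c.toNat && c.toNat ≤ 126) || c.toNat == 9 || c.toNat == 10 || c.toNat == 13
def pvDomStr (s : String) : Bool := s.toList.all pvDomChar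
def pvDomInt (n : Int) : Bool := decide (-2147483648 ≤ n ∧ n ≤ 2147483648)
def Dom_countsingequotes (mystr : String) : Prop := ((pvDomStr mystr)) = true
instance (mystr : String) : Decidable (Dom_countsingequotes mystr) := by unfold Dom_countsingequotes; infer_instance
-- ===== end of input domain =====

-- B replaces A's explicit prevchar loop by a closed-form difference of two substring
-- counts (quotes minus escaped quotes); objective: simpler.


-- ===== PORT A =====
-- A: loop over the characters carrying (hypcount, prevchar), prevchar initialised to 'a'.
def countsingequotes (mystr : String) : Int :=
  (mystr.toList.foldl
    (fun (st : Int × Char) c =>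
      (if c = '\'' ∧ st.2 ≠ '\\' then st.1 + 1 else st.1, c))
    (0, 'a')).1

-- ===== PORT B =====
-- B: mystr.count("'") - mystr.count("\\'")
def countsingequotes_alt (mystr : String) : Int :=
  (PySem.Str.count mystr "'" : Int) - (PySem.Str.count mystr "\\'" : Int)

-- ===== PRECONDITION & SPEC =====
def Spec_countsingequotes (mystr : String) (out : Int) : Prop := out = countsingequotes_alt mystr
instance (mystr : String) (out : Int) : Decidable (Spec_countsingequotes mystr out) := by unfold Spec_countsingequotes; infer_instance

-- ===== CLAIM (what is proved, stated in full; the proofs are below) =====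
def Claim_equal_countsingequotes : Prop := ∀ (mystr : String), Dom_countsingequotes mystr → Spec_countsingequotes mystr (countsingequotes mystr)

-- ===== LEMMAS AND PROOFS =====

-- number of (necessarily non-overlapping) occurrences of the two-char substring "\'"
def escCount : List Char → Nat
  | [] => 0
  | [_] => 0
  | a :: b :: t => if a = '\\' ∧ b = '\'' then escCount t + 1 else escCount (b :: t)

-- A's loop as a recursive function of the previous character
def uqCount : Char → List Char → Nat
  | _, [] => 0
  | prev, c :: t => (if c = '\'' ∧ prev ≠ '\\' then 1 else 0) + uqCount c t

lemma escCount_cons_ne (a : Char) (t : List Char) (ha : a ≠ '\\') :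
    escCount (a :: t) = escCount t := by
  cases t with
  | nil => simp [escCount]
  | cons b u =>
    simp only [escCount]
    rw [if_neg (fun h => ha h.1)]

lemma foldl_eq_uqCount (l : List Char) (n : Int) (prev : Char) :
    (l.foldl (fun (st : Int × Char) c =>
      (if c = '\'' ∧ st.2 ≠ '\\' then st.1 + 1 else st.1, c)) (n, prev)).1
      = n + (uqCount prev l : Int) := by
  induction l generalizing n prev with
  | nil => simp [uqCount]
  | cons c t ih =>
    simp only [List.foldl_cons, uqCount]
    by_cases h : c = '\'' ∧ prev ≠ '\\' <;> simp [h, ih] <;> ring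

lemma uqCount_add_escCount (l : List Char) (prev : Char) :
    uqCount prev l + escCount (if prev = '\\' then '\\' :: l else l) = l.count '\'' := by
  induction l generalizing prev with
  | nil =>
    by_cases h : prev = '\\' <;> simp [h, uqCount, escCount]
  | cons c t ih =>
    by_cases hp : prev = '\\'
    · -- prev is a backslash: the head quote (if any) is escaped
      subst hp
      rw [if_pos rfl]
      have hc : ¬ (c = '\'' ∧ ('\\' : Char) ≠ '\\') := fun h => h.2 rfl
      simp only [uqCount, if_neg hc, List.count_cons]
      by_cases hq : c = '\''
      · subst hq
        have h2 : escCount ('\\' :: '\'' :: t) = escCount t + 1 := by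
          simp [escCount]
        rw [h2]
        have := ih '\''
        rw [if_neg (by decide)] at this
        simp only [beq_self_eq_true, if_true]
        omega
      · have h2 : escCount ('\\' :: c :: t) = escCount (c :: t) := by
          simp only [escCount]; rw [if_neg (fun h => hq h.2)]
        rw [h2, if_neg (by simpa using hq)]
        by_cases hb : c = '\\'
        · subst hb
          have := ih '\\'
          rw [if_pos rfl] at this
          omega
        · rw [escCount_cons_ne c t hb]
          have := ih c
          rw [if_neg hb] at this
          omega
    · -- prev is not a backslash: a head quote is counted
      rw [if_neg hp]
      simp only [uqCount, List.count_cons]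
      by_cases hb : c = '\\'
      · subst hb
        rw [if_neg (fun h => absurd h.1 (by decide)), if_neg (by decide)]
        have := ih '\\'
        rw [if_pos rfl] at this
        omega
      · rw [escCount_cons_ne c t hb]
        have := ih c
        rw [if_neg hb] at this
        by_cases hq : c = '\''
        · subst hq
          rw [if_pos ⟨rfl, hp⟩, if_pos (by simp)]
          omega
        · rw [if_neg (fun h => hq h.1), if_neg (by simpa using hq)]
          omega

-- count.go for a single-character needle counts that character
lemma go_single (c : Char) (fuel : Nat) :
    ∀ (l : List Char) (acc : Nat), l.length ≤ fuel →
      PySem.Chars.count.go [c] fuel l acc = acc + l.count c := by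
  induction fuel with
  | zero =>
    intro l acc h
    have : l = [] := List.eq_nil_of_length_eq_zero (Nat.le_zero.mp h)
    subst this
    simp [PySem.Chars.count.go]
  | succ fuel ih =>
    intro l acc h
    cases l with
    | nil => simp [PySem.Chars.count.go]
    | cons a t =>
      simp only [PySem.Chars.count.go, List.isPrefixOf,
        Bool.and_true, List.count_cons]
      by_cases hca : c == a
      · rw [if_pos (by simp [hca])]
        simp only [List.length_cons, List.length_nil, List.drop_succ_cons, List.drop_zero]
        rw [ih t (acc + 1) (by simpa using Nat.le_of_succ_le_succ h)]
        have : a == c := by simpa [BEq.comm] using hca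
        simp [this]
        omega
      · rw [if_neg (by simp [hca])]
        rw [ih t acc (by simpa using Nat.le_of_succ_le_succ h)]
        have : ¬ (a == c) := by
          intro hac
          exact hca (by simpa [BEq.comm] using hac)
        simp [this]
  
-- count.go for "\\'" counts escCount
lemma go_esc (fuel : Nat) :
    ∀ (l : List Char) (acc : Nat), l.length ≤ fuel →
      PySem.Chars.count.go ['\\', '\''] fuel l acc = acc + escCount l := by
  induction fuel with
  | zero =>
    intro l acc h
    have : l = [] := List.eq_nil_of_length_eq_zero (Nat.le_zero.mp h)
    subst this
    simp [PySem.Chars.count.go, escCount]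
  | succ fuel ih =>
    intro l acc h
    cases l with
    | nil => simp [PySem.Chars.count.go, escCount]
    | cons a t =>
      cases t with
      | nil =>
        -- needle has length 2, haystack length 1: no match, recurse on []
        simp only [PySem.Chars.count.go, List.isPrefixOf]
        rw [if_neg (by simp)]
        rw [ih [] acc (by simp)]
        simp [escCount]
      | cons b u =>
        simp only [PySem.Chars.count.go]
        by_cases hm : a = '\\' ∧ b = '\''
        · obtain ⟨ha, hb⟩ := hm
          subst ha; subst hb
          rw [if_pos (by simp [List.isPrefixOf])]
          simp only [List.length_cons, List.length_nil, List.drop_succ_cons, List.drop_zero]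
          rw [ih u (acc + 1) (by simp at h; omega)]
          have : escCount ('\\' :: '\'' :: u) = escCount u + 1 := by simp [escCount]
          omega
        · rw [if_neg (by
            simp only [List.isPrefixOf, Bool.and_eq_true, beq_iff_eq,
              List.isPrefixOf_nil_left, and_true]
            intro hc
            exact hm ⟨hc.1.symm, hc.2.symm⟩)]
          rw [ih (b :: u) acc (by simp at h ⊢; omega)]
          have : escCount (a :: b :: u) = escCount (b :: u) := by simp [escCount, hm]
          omega

lemma escCount_le_count (l : List Char) :
    escCount l ≤ l.count '\'' := by
  have := uqCount_add_escCount l 'a'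
  rw [if_neg (by decide)] at this
  omega

-- ===== VERDICT (by name: the statement is the Claim_ definition above) =====
theorem countsingequotes_spec : Claim_equal_countsingequotes := by
  intro s _
  show countsingequotes s = countsingequotes_alt s
  unfold countsingequotes countsingequotes_alt
  rw [foldl_eq_uqCount s.toList 0 'a']
  have h1 : PySem.Str.count s "'" = s.toList.count '\'' := by
    rw [PySem.Str.count_eq]
    show PySem.Chars.count s.toList ['\''] = _
    unfold PySem.Chars.count
    rw [if_neg (by simp)]
    rw [go_single '\'' s.toList.length s.toList 0 (le_refl _)]
    omega
  have h2 : PySem.Str.count s "\\'" = escCount s.toList := by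
    rw [PySem.Str.count_eq]
    show PySem.Chars.count s.toList ['\\', '\''] = _
    unfold PySem.Chars.count
    rw [if_neg (by simp)]
    rw [go_esc s.toList.length s.toList 0 (le_refl _)]
    omega
  rw [h1, h2]
  have h3 := uqCount_add_escCount s.toList 'a'
  rw [if_neg (by decide)] at h3
  have h4 := escCount_le_count s.toList
  omega
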